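-- pv_equiv track=rewrite | github.com/ktawiah/CodePath-DSA | Unit-2/Session-1/Advanced_V2/declutter.py | declutter
-- ===== SOURCE A (Python) =====
-- def declutter(souvenirs, threshold):
--     """
--     P: Return list of souvenirs whose number is below given threshold
--     """
--
--     # Create a freq map to store souvenir counts
--     souvenir_count = {}
--     for souvenir in souvenirs:
--         souvenir_count[souvenir] = souvenir_count.get(souvenir, 0) + 1
--
--     # Create result list
--     result = []
--
--     # Iterate through map
--     for souvenir, count in souvenir_count.items():
--
--         # Update result list based on count
--         if count < threshold:
--             while count != 0:
--                 result.append(souvenir)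
--                 count -= 1
--
--     # Return result list
--     return result
-- ===== SOURCE B (Python) =====
-- def declutter(souvenirs, threshold):
--     """
--     P: Return list of souvenirs whose number is below given threshold
--     """
--     result = []
--     remaining = souvenirs
--     while remaining:
--         s = remaining[0]
--         same = [x for x in remaining if x == s]
--         if len(same) < threshold:
--             result += same
--         remaining = [x for x in remaining if x != s]
--     return result
-- ===== Notes on version B (the rewrite author's own statement) =====
-- stated objective: alternative
-- what changed: Replaces A's prebuilt frequency dict (counting pass + pass over dict items) with a shrinking-worklist loop: repeatedly take the head of the remaining list, partition the worklist into that element's occurrences and the rest, emit the group if small enough, and continue on the rest; no frequency map or seen-set is ever built.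
import Mathlib
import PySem

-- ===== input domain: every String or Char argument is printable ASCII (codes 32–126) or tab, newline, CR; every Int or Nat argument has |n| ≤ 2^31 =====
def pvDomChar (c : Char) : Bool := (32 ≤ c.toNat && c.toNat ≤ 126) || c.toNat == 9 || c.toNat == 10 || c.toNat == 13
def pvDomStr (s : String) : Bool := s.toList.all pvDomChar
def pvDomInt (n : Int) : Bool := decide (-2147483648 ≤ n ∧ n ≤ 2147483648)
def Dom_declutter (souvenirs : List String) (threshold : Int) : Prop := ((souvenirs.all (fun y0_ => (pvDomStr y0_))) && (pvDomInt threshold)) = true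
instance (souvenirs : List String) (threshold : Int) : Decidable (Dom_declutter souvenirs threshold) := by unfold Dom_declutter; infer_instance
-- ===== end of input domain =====

-- B replaces A's prebuilt frequency dict with a shrinking-worklist loop that
-- repeatedly partitions the remaining list by its head element (alternative
-- decomposition, same return value; not claimed faster).


-- ===== PORT A =====
-- 'while count != 0: result.append(souvenir); count -= 1', run on a counter value
-- count ≥ 1, appends exactly count times; ported as Nat recursion on count.toNat
-- (exact, since dict counter values are always ≥ 1).
def pushWhile (result : List String) (souvenir : String) : Nat → List String
  | 0 => result
  | n + 1 => pushWhile (result ++ [souvenir]) souvenir n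

def declutter (souvenirs : List String) (threshold : Int) : List String :=
  let souvenir_count : PySem.Dict String Int :=
    souvenirs.foldl (fun d souvenir => d.insert souvenir (d.getD souvenir 0 + 1)) PySem.Dict.empty
  souvenir_count.items.foldl
    (fun result p =>
      if p.2 < threshold then pushWhile result p.1 p.2.toNat else result)
    []

-- ===== PORT B =====
-- the 'while remaining:' loop of Source B; terminates because the head's occurrences
-- (at least the head itself) are removed on each iteration
def declutterLoop (threshold : Int) (remaining result : List String) : List String :=
  match remaining with
  | [] => result
  | s :: t =>
    let same := (s :: t).filter (fun x => x == s)
    let rest := (s :: t).filter (fun x => !(x == s))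
    declutterLoop threshold rest
      (if (same.length : Int) < threshold then result ++ same else result)
termination_by remaining.length
decreasing_by
  simp only [List.filter_cons, BEq.rfl, Bool.not_true, List.length_cons]
  exact Nat.lt_succ_of_le (List.length_filter_le _ _)

def declutter_alt (souvenirs : List String) (threshold : Int) : List String :=
  declutterLoop threshold souvenirs []

-- ===== PRECONDITION & SPEC =====
def Spec_declutter (souvenirs : List String) (threshold : Int) (out : List String) : Prop := out = declutter_alt souvenirs threshold
instance (souvenirs : List String) (threshold : Int) (out : List String) : Decidable (Spec_declutter souvenirs threshold out) := by unfold Spec_declutter; infer_instance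

-- ===== CLAIM (what is proved, stated in full; the proofs are below) =====
def Claim_equal_declutter : Prop := ∀ (souvenirs : List String) (threshold : Int), Dom_declutter souvenirs threshold → Spec_declutter souvenirs threshold (declutter souvenirs threshold)

-- ===== LEMMAS AND PROOFS =====

-- the emission step both programs perform per distinct souvenir
def emit (souvenirs : List String) (threshold : Int) (res : List String) (k : String) : List String :=
  if (List.count k souvenirs : Int) < threshold
  then res ++ List.replicate (List.count k souvenirs) k else res

lemma pushWhile_eq (s : String) : ∀ (n : Nat) (res : List String),
    pushWhile res s n = res ++ List.replicate n s := by
  intro n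
  induction n with
  | zero => intro res; simp [pushWhile]
  | succ m ih =>
      intro res
      simp [pushWhile, ih, List.replicate_succ]

-- A equals the fold of `emit` over the distinct souvenirs in first-occurrence order
lemma declutter_eq_emit (souvenirs : List String) (threshold : Int) :
    declutter souvenirs threshold
      = (PySem.Set.ofList souvenirs).foldl (emit souvenirs threshold) [] := by
  unfold declutter
  rw [PySem.Dict.foldl_insert_getD_add_one_eq_counter]
  simp only [PySem.Dict.items_counter, List.foldl_map]
  apply PySem.List.foldl_congr_mem
  intro res k _
  unfold emit
  split_ifs with h
  · rw [pushWhile_eq]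
    simp
  · rfl

-- occurrences of an element already in the accumulated set do not change an update
lemma update_filter_of_mem (s : String) : ∀ (t : List String) (acc : PySem.Set String),
    s ∈ acc →
    PySem.Set.update acc t = PySem.Set.update acc (t.filter (fun x => !(x == s))) := by
  intro t
  induction t with
  | nil => intro acc _; rfl
  | cons x t ih =>
      intro acc hs
      by_cases hx : x = s
      · subst hx
        rw [List.filter_cons_of_neg (by simp), PySem.Set.update_cons,
            PySem.Set.add_of_mem hs, ih acc hs]
      · rw [List.filter_cons_of_pos (by simp [hx]), PySem.Set.update_cons,
            PySem.Set.update_cons]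
        exact ih _ (by rw [PySem.Set.mem_add]; exact Or.inl hs)

-- set(s :: t) = s followed by set(t with s removed)
lemma ofList_cons_filter (s : String) (t : List String) :
    PySem.Set.ofList (s :: t)
      = s :: PySem.Set.ofList (t.filter (fun x => !(x == s))) := by
  have h1 : PySem.Set.ofList (s :: t) = PySem.Set.update [s] t := by
    rw [← PySem.Set.update_nil_left, PySem.Set.update_cons]
    rfl
  rw [h1, update_filter_of_mem s t [s] (by simp),
      PySem.Set.update_eq_append_filter]
  have h2 : ∀ y ∈ PySem.Set.ofList (t.filter (fun x => !(x == s))),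
      (!(PySem.Set.contains [s] y)) = true := by
    intro y hy
    rw [PySem.Set.mem_ofList, List.mem_filter] at hy
    have hys : y ≠ s := by simpa using hy.2
    simp [PySem.Set.contains_eq_listContains, hys]
  rw [List.filter_eq_self.mpr h2]
  rfl

-- B's loop equals the fold of `emit` (counts taken over the current worklist)
lemma declutterLoop_eq_emit (threshold : Int) : ∀ (l res : List String),
    declutterLoop threshold l res
      = (PySem.Set.ofList l).foldl (emit l threshold) res := by
  intro l
  induction l using (measure List.length).wf.induction with
  | _ l ih =>
    intro res
    match l with
    | [] => rw [declutterLoop]; simp [PySem.Set.ofList]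
    | s :: t =>
      rw [declutterLoop]
      set rest := (s :: t).filter (fun x => !(x == s)) with hrest
      have hrl : rest.length < (s :: t).length := by
        rw [hrest, List.filter_cons_of_neg (by simp)]
        exact Nat.lt_succ_of_le (List.length_filter_le _ _)
      have hsame : (s :: t).filter (fun x => x == s)
          = List.replicate (List.count s (s :: t)) s := List.filter_beq s
      have hstep : (if (((s :: t).filter (fun x => x == s)).length : Int) < threshold
            then res ++ (s :: t).filter (fun x => x == s) else res)
          = emit (s :: t) threshold res s := by
        rw [hsame]; unfold emit; rw [List.length_replicate]
      rw [hstep, ih rest hrl]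
      have hcount : ∀ k ∈ PySem.Set.ofList rest,
          List.count k rest = List.count k (s :: t) := by
        intro k hk
        rw [PySem.Set.mem_ofList, hrest, List.mem_filter] at hk
        rw [hrest]
        exact List.count_filter hk.2
      have hcongr : (PySem.Set.ofList rest).foldl (emit rest threshold) (emit (s :: t) threshold res s)
          = (PySem.Set.ofList rest).foldl (emit (s :: t) threshold) (emit (s :: t) threshold res s) := by
        apply PySem.List.foldl_congr_mem
        intro r k hk
        unfold emit
        rw [hcount k hk]
      rw [hcongr]
      have hof : PySem.Set.ofList (s :: t) = s :: PySem.Set.ofList rest := by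
        rw [hrest, ofList_cons_filter s t]
        congr 1
        rw [List.filter_cons_of_neg (by simp)]
      rw [hof, List.foldl_cons]

-- ===== VERDICT (by name: the statement is the Claim_ definition above) =====
theorem declutter_spec : Claim_equal_declutter := by
  intro souvenirs threshold _
  unfold Spec_declutter declutter_alt
  rw [declutter_eq_emit, declutterLoop_eq_emit]
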